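-- pv_equiv track=rewrite | github.com/Furkanahii/Rheo-MVP | Cmpe 150/Cmpe HW4/hw6/HW6-2023400312.py | sort_rows_border
-- ===== SOURCE A (Python) =====
-- def sort_rows_border(matris):
--     boy = len(matris)
--
--     for i in range(boy):
--         satir = matris[i]
--         gruplar = []
--         gecici = []
--
--         for eleman in satir:
--             if eleman == 0:
--                 if len(gecici) > 0:
--                     gruplar.append(gecici)
--                     gecici = []
--                 gruplar.append("SINIR") # 0 gordugumuz yere isaret koyduk
--             else:
--                 gecici.append(eleman)
--
--         if len(gecici) > 0:
--             gruplar.append(gecici)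
--
--         # Gruplardan yeni satiri olusturduk
--         yeni_satir = []
--         for grup in gruplar:
--             if grup == "SINIR":
--                 yeni_satir.append(0)
--             else:
--                 grup.sort()
--                 yeni_satir.extend(grup)
--
--         matris[i] = yeni_satir
--
--     return matris
-- ===== SOURCE B (Python) =====
-- def sort_rows_border(matris):
--     for i in range(len(matris)):
--         satir = matris[i]
--         yeni = []
--         start = 0
--         for j, v in enumerate(satir):
--             if v == 0:
--                 yeni += sorted(satir[start:j])
--                 yeni.append(0)
--                 start = j + 1
--         matris[i] = yeni + sorted(satir[start:])
--     return matris
-- ===== Notes on version B (the rewrite author's own statement) =====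
-- stated objective: simpler
-- what changed: Single pass per row with a segment-start index and slices, sorting each segment at the zero that ends it, instead of first building a group list with 'SINIR' sentinel markers and then a second emit pass.
import Mathlib
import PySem

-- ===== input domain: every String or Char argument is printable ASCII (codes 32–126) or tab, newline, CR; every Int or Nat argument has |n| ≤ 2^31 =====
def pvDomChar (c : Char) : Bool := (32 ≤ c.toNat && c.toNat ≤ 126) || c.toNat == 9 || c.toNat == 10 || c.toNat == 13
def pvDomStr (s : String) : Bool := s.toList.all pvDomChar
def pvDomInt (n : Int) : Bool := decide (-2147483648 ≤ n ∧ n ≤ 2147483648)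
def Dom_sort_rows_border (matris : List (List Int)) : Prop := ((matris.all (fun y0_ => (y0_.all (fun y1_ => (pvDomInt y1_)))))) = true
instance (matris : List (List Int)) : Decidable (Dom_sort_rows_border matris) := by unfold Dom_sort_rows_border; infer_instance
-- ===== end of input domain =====

-- B replaces A's two-pass build-groups-with-'SINIR'-sentinel-then-emit by a single pass per row
-- with a segment-start index and slices (equivalence is about the return value; both Pythons
-- also replace matris's rows in place).

-- ===== PORT A =====
-- A's mixed list 'gruplar' ("SINIR" or a group) is modelled as List (Option (List Int)),
-- none = "SINIR". grup.sort() on an int list = sorted(grup).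
def pvStepA (s : List (Option (List Int)) × List Int) (eleman : Int) :
    List (Option (List Int)) × List Int :=
  if eleman = 0 then
    (if s.2.length > 0 then s.1 ++ [some s.2, none] else s.1 ++ [none], [])
  else (s.1, s.2 ++ [eleman])

def pvEmitA (yeni : List Int) (grup : Option (List Int)) : List Int :=
  match grup with
  | none => yeni ++ [0]
  | some g => yeni ++ PySem.List.sorted g id false

def pvRowA (satir : List Int) : List Int :=
  let st := satir.foldl pvStepA ([], [])
  let gruplar := if st.2.length > 0 then st.1 ++ [some st.2] else st.1
  gruplar.foldl pvEmitA []

def sort_rows_border (matris : List (List Int)) : List (List Int) :=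
  matris.map pvRowA

-- ===== PORT B =====
def pvStepB (satir : List Int) (s : List Int × Int) (jv : Int × Int) : List Int × Int :=
  if jv.2 = 0 then
    (s.1 ++ PySem.List.sorted (PySem.List.slice satir (some s.2) (some jv.1)) id false ++ [0],
     jv.1 + 1)
  else s

def pvRowB (satir : List Int) : List Int :=
  let st := (PySem.List.enumerate satir 0).foldl (pvStepB satir) ([], 0)
  st.1 ++ PySem.List.sorted (PySem.List.slice satir (some st.2) none) id false

def sort_rows_border_alt (matris : List (List Int)) : List (List Int) :=
  matris.map pvRowB

-- ===== PRECONDITION & SPEC =====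
def Spec_sort_rows_border (matris : List (List Int)) (out : List (List Int)) : Prop := out = sort_rows_border_alt matris
instance (matris : List (List Int)) (out : List (List Int)) : Decidable (Spec_sort_rows_border matris out) := by unfold Spec_sort_rows_border; infer_instance

-- ===== CLAIM (what is proved, stated in full; the proofs are below) =====
def Claim_equal_sort_rows_border : Prop := ∀ (matris : List (List Int)), Dom_sort_rows_border matris → Spec_sort_rows_border matris (sort_rows_border matris)

-- ===== LEMMAS AND PROOFS =====

-- Reference: emit sorted maximal non-zero segments, zeros kept in place; cur = current open segment.
def pvGo : List Int → List Int → List Int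
  | [], cur => PySem.List.sorted cur id false
  | x :: t, cur =>
      if x = 0 then PySem.List.sorted cur id false ++ 0 :: pvGo t []
      else pvGo t (cur ++ [x])

def pvF : Option (List Int) → List Int
  | none => [0]
  | some g => PySem.List.sorted g id false

theorem pvEmit_flat : ∀ (g : List (Option (List Int))) (yeni : List Int),
    g.foldl pvEmitA yeni = yeni ++ g.flatMap pvF := by
  intro g
  induction g with
  | nil => intro yeni; simp
  | cons x t ih =>
      intro yeni
      cases x <;> simp [List.foldl, pvEmitA, ih, pvF]

def pvFinishA (st : List (Option (List Int)) × List Int) : List Int :=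
  (if st.2.length > 0 then st.1 ++ [some st.2] else st.1).flatMap pvF

theorem pvSorted_nil : PySem.List.sorted ([] : List Int) id false = [] := by decide

theorem pvA_inv : ∀ (t : List Int) (gruplar : List (Option (List Int))) (gecici : List Int),
    pvFinishA (t.foldl pvStepA (gruplar, gecici)) = gruplar.flatMap pvF ++ pvGo t gecici := by
  intro t
  induction t with
  | nil =>
      intro gruplar gecici
      by_cases h : gecici = []
      · subst h; simp [pvFinishA, pvGo, pvSorted_nil]
      · simp [pvFinishA, pvGo, pvF, List.length_pos_iff, h]
  | cons v t ih =>
      intro gruplar gecici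
      by_cases hv : v = 0
      · subst hv
        by_cases h : gecici = []
        · subst h
          simp [List.foldl, pvStepA, pvGo, pvSorted_nil, ih, pvF]
        · simp [List.foldl, pvStepA, pvGo, List.length_pos_iff, h, ih, pvF]
      · simp [List.foldl, pvStepA, hv, pvGo, ih]

theorem pvRowA_eq_go (satir : List Int) : pvRowA satir = pvGo satir [] := by
  have h := pvA_inv satir [] []
  simp only [pvFinishA, List.flatMap_nil, List.nil_append] at h
  simpa [pvRowA, pvEmit_flat] using h

def pvFinB (satir : List Int) (st : List Int × Int) : List Int :=
  st.1 ++ PySem.List.sorted (PySem.List.slice satir (some st.2) none) id false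

theorem pvB_inv (satir : List Int) :
    ∀ (t : List Int) (j s : Nat) (out : List Int),
    satir.drop j = t → s ≤ j →
    pvFinB satir ((PySem.List.enumerate t (j : Int)).foldl (pvStepB satir) (out, (s : Int)))
      = out ++ pvGo t ((satir.drop s).take (j - s)) := by
  intro t
  induction t with
  | nil =>
      intro j s out hdrop hsj
      have hlen : satir.length ≤ j := by
        by_contra h
        have := List.length_drop (l := satir) (i := j)
        rw [hdrop] at this
        simp at this
        omega
      have htake : (satir.drop s).take (j - s) = satir.drop s := by
        apply List.take_of_length_le
        simp; omega
      simp [PySem.List.enumerate, pvGo, htake, pvFinB, PySem.List.slice_from_natCast]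
  | cons v t ih =>
      intro j s out hdrop hsj
      have hj : j < satir.length := by
        by_contra h
        have : satir.drop j = [] := List.drop_eq_nil_of_le (by omega)
        rw [hdrop] at this; exact absurd this (by simp)
      have hget : satir[j] = v := by
        have h0 : (satir.drop j)[0]'(by rw [hdrop]; simp) = v := by simp [hdrop]
        simpa [List.getElem_drop] using h0
      have hdrop' : satir.drop (j + 1) = t := by
        rw [← List.drop_drop, hdrop]; simp
      have hcast : ((j : Int) + 1) = ((j + 1 : Nat) : Int) := by push_cast; ring
      rw [PySem.List.enumerate_cons]
      simp only [List.foldl_cons, pvStepB]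
      by_cases hv : v = 0
      · subst hv
        simp only [if_true]
        rw [hcast, ih (j + 1) (j + 1) _ hdrop' (le_refl _)]
        simp [pvGo, PySem.List.slice_natCast]
      · simp only [if_neg hv]
        rw [hcast, ih (j + 1) s out hdrop' (by omega)]
        have hseg : (satir.drop s).take (j + 1 - s) = (satir.drop s).take (j - s) ++ [v] := by
          have hlt : j - s < (satir.drop s).length := by simp; omega
          have hgd : (satir.drop s)[j - s] = v := by
            rw [List.getElem_drop]
            have hs : s + (j - s) = j := by omega
            simp [hs, hget]
          have h1 : j + 1 - s = (j - s) + 1 := by omega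
          rw [h1, List.take_add_one]
          simp [List.getElem?_eq_getElem hlt, hgd]
        simp [pvGo, hv, hseg]

theorem pvRowB_eq_go (satir : List Int) : pvRowB satir = pvGo satir [] := by
  have h := pvB_inv satir satir 0 0 [] (by simp) (le_refl 0)
  simpa [pvRowB, pvFinB] using h

-- ===== VERDICT (by name: the statement is the Claim_ definition above) =====
theorem sort_rows_border_spec : Claim_equal_sort_rows_border := by
  intro matris _
  unfold Spec_sort_rows_border sort_rows_border sort_rows_border_alt
  exact List.map_congr_left fun satir _ => by
    rw [pvRowA_eq_go, pvRowB_eq_go]
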